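-- pv_equiv track=rewrite | github.com/yoshi8777/sma | programs/code/splitsum.py | splitsum
-- ===== SOURCE A (Python) =====
-- def splitsum(l):
--     pos_sum = 0
--     neg_sum = 0
--
--     for num in l:
--         if num > 0:
--             pos_sum += num ** 2
--         elif num < 0:
--             neg_sum += num ** 3
--
--     return [pos_sum, neg_sum]
-- ===== SOURCE B (Python) =====
-- def splitsum(l):
--     # Divide and conquer: split the list in half, solve each half recursively,
--     # combine by component-wise addition. Base cases: empty and singleton.
--     def go(seg):
--         if not seg:
--             return (0, 0)
--         if len(seg) == 1:
--             x = seg[0]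
--             if x > 0:
--                 return (x ** 2, 0)
--             if x < 0:
--                 return (0, x ** 3)
--             return (0, 0)
--         m = len(seg) // 2
--         p1, n1 = go(seg[:m])
--         p2, n2 = go(seg[m:])
--         return (p1 + p2, n1 + n2)
--     p, n = go(l)
--     return [p, n]
-- ===== Notes on version B (the rewrite author's own statement) =====
-- stated objective: alternative
-- what changed: Replaces A's single linear branching-accumulator loop with a divide-and-conquer recursion that halves the list, solves each half independently and combines the two pair-sums component-wise.
import Mathlib
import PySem

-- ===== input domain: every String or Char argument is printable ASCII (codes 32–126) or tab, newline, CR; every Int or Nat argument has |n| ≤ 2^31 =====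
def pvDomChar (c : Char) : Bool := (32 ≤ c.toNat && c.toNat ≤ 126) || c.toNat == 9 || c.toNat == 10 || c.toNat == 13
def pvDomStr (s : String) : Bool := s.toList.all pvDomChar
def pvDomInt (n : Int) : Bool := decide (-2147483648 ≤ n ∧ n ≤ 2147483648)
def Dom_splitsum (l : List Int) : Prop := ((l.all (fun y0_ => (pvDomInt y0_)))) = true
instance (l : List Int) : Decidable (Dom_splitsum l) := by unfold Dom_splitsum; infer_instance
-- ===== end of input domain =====

-- B replaces A's single branching accumulator loop with a divide-and-conquer recursion
-- (halve, recurse, add component-wise); alternative structure, same results.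


-- ===== PORT A =====
def splitsum (l : List Int) : List Int :=
  let st := l.foldl (fun (acc : Int × Int) num =>
    if num > 0 then (acc.1 + num ^ 2, acc.2)
    else if num < 0 then (acc.1, acc.2 + num ^ 3)
    else acc) (0, 0)
  [st.1, st.2]

-- ===== PORT B =====
def splitsumGo (seg : List Int) : Int × Int :=
  match seg with
  | [] => (0, 0)
  | [x] => if x > 0 then (x ^ 2, 0) else if x < 0 then (0, x ^ 3) else (0, 0)
  | a :: b :: rest =>
    let m := (a :: b :: rest).length / 2
    let r1 := splitsumGo ((a :: b :: rest).take m)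
    let r2 := splitsumGo ((a :: b :: rest).drop m)
    (r1.1 + r2.1, r1.2 + r2.2)
termination_by seg.length
decreasing_by
  · simp [List.length_take]; omega
  · simp [List.length_drop]; omega

def splitsum_alt (l : List Int) : List Int :=
  let r := splitsumGo l
  [r.1, r.2]

-- ===== PRECONDITION & SPEC =====
def Spec_splitsum (l : List Int) (out : List Int) : Prop := out = splitsum_alt l
instance (l : List Int) (out : List Int) : Decidable (Spec_splitsum l out) := by unfold Spec_splitsum; infer_instance

-- ===== CLAIM (what is proved, stated in full; the proofs are below) =====
def Claim_equal_splitsum : Prop := ∀ (l : List Int), Dom_splitsum l → Spec_splitsum l (splitsum l)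

-- ===== LEMMAS AND PROOFS =====
def pvP (l : List Int) : Int := ((l.filter (fun x => x > 0)).map (fun x => x ^ 2)).sum
def pvN (l : List Int) : Int := ((l.filter (fun x => x < 0)).map (fun x => x ^ 3)).sum

lemma pvP_append (a b : List Int) : pvP (a ++ b) = pvP a + pvP b := by
  simp [pvP]
lemma pvN_append (a b : List Int) : pvN (a ++ b) = pvN a + pvN b := by
  simp [pvN]
lemma pvP_split (m : Nat) (l : List Int) : pvP (l.take m) + pvP (l.drop m) = pvP l := by
  rw [← pvP_append, List.take_append_drop]
lemma pvN_split (m : Nat) (l : List Int) : pvN (l.take m) + pvN (l.drop m) = pvN l := by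
  rw [← pvN_append, List.take_append_drop]

lemma splitsumGo_eq (l : List Int) : splitsumGo l = (pvP l, pvN l) := by
  induction l using splitsumGo.induct with
  | case1 => simp [splitsumGo, pvP, pvN]
  | case2 x hx =>
    have hx2 : ¬ x < 0 := by omega
    simp [splitsumGo, pvP, pvN, hx, hx2]
  | case3 x hx hx2 =>
    simp [splitsumGo, pvP, pvN, hx, hx2]
  | case4 x hx hx2 =>
    simp [splitsumGo, pvP, pvN, hx, hx2]
  | case5 a b rest m ih1 ih2 =>
    have hm : m = (a :: b :: rest).length / 2 := rfl
    rw [hm] at ih1 ih2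
    rw [splitsumGo]
    simp only [ih1, ih2]
    rw [Prod.mk.injEq]
    exact ⟨pvP_split _ _, pvN_split _ _⟩

lemma splitsum_fold (l : List Int) (p q : Int) :
    l.foldl (fun (acc : Int × Int) num =>
      if num > 0 then (acc.1 + num ^ 2, acc.2)
      else if num < 0 then (acc.1, acc.2 + num ^ 3)
      else acc) (p, q) = (p + pvP l, q + pvN l) := by
  induction l generalizing p q with
  | nil => simp [pvP, pvN]
  | cons x xs ih =>
    by_cases hx : x > 0
    · have hx2 : ¬ x < 0 := by omega
      simp [hx, hx2, ih, pvP, pvN, add_assoc]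
    · by_cases hx2 : x < 0
      · simp [hx, hx2, ih, pvP, pvN, add_assoc]
      · simp [hx, hx2, ih, pvP, pvN]

-- ===== VERDICT (by name: the statement is the Claim_ definition above) =====
theorem splitsum_spec : Claim_equal_splitsum := by
  intro l _
  unfold Spec_splitsum splitsum splitsum_alt
  simp [splitsum_fold, splitsumGo_eq]
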